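-- pv_equiv track=rewrite | github.com/zabojpetr/aoc | 2015/08/v02.py | char_in_memory
-- ===== SOURCE A (Python) =====
-- def char_in_memory(raw: str) -> int:
--     counter = -2 # start + end quotes
--     escape = False
--     for c in raw:
--         if not escape and c == "\\":
--             escape = True
--             continue
--
--         if escape:
--             escape = False
--             if c == "x":
--                 counter -= 2
--
--         counter += 1
--
--     return counter
-- ===== SOURCE B (Python) =====
-- def char_in_memory(raw: str) -> int:
--     # Token-based scan: consume a whole backslash escape (2 chars) per step
--     # instead of carrying an escape flag across iterations.
--     n = 0
--     i = 0
--     L = len(raw)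
--     while i < L:
--         if raw[i] == "\\" and i + 1 < L:
--             n += -1 if raw[i + 1] == "x" else 1
--             i += 2
--         elif raw[i] == "\\":
--             i += 1
--         else:
--             n += 1
--             i += 1
--     return n - 2
-- ===== Notes on version B (the rewrite author's own statement) =====
-- stated objective: alternative
-- what changed: Replaced the escape-flag state machine with a tokenizer that consumes a whole 2-char backslash escape per step via index arithmetic (no cross-iteration flag), accumulating per-token contributions and subtracting the quote constant at the end.
import Mathlib
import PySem

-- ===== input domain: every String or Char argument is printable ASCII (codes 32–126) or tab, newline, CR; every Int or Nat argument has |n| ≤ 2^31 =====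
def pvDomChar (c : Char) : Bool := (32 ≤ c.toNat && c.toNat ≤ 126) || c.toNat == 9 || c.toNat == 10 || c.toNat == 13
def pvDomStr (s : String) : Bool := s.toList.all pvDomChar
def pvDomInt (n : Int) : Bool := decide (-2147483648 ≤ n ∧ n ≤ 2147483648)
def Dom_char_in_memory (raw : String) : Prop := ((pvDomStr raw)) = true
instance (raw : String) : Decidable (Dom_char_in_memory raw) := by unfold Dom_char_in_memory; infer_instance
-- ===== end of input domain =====

-- B replaces A's escape-flag state machine with a 2-char-per-step escape tokenizer (alternative decomposition, same cost).

-- ===== PORT A =====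
-- A's for-loop over the characters, carrying (counter, escape) as state.
def char_in_memory (raw : String) : Int :=
  (raw.toList.foldl
    (fun (st : Int × Bool) (c : Char) =>
      if !st.2 && c = '\\' then (st.1, true)
      else if st.2 then ((if c = 'x' then st.1 - 2 else st.1) + 1, false)
      else (st.1 + 1, false))
    (-2, false)).1

-- ===== PORT B =====
-- B's while-loop over indices, transcribed as recursion on the remaining characters:
-- a backslash with a successor consumes two characters at once.
def pvAltLoop : List Char → Int
  | '\\' :: c :: rest => (if c = 'x' then (-1 : Int) else 1) + pvAltLoop rest
  | ['\\'] => 0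
  | _ :: rest => 1 + pvAltLoop rest
  | [] => 0

def char_in_memory_alt (raw : String) : Int := pvAltLoop raw.toList - 2

-- ===== PRECONDITION & SPEC =====
def Spec_char_in_memory (raw : String) (out : Int) : Prop := out = char_in_memory_alt raw
instance (raw : String) (out : Int) : Decidable (Spec_char_in_memory raw out) := by unfold Spec_char_in_memory; infer_instance

-- ===== CLAIM (what is proved, stated in full; the proofs are below) =====
def Claim_equal_char_in_memory : Prop := ∀ (raw : String), Dom_char_in_memory raw → Spec_char_in_memory raw (char_in_memory raw)

-- ===== LEMMAS AND PROOFS =====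
def pvStep : Int × Bool → Char → Int × Bool :=
  fun st c =>
    if !st.2 && c = '\\' then (st.1, true)
    else if st.2 then ((if c = 'x' then st.1 - 2 else st.1) + 1, false)
    else (st.1 + 1, false)

theorem pvLoop_eq (l : List Char) : ∀ k : Int, (l.foldl pvStep (k, false)).1 = k + pvAltLoop l := by
  induction l using pvAltLoop.induct with
  | case1 c rest ih =>
      intro k
      by_cases hx : c = 'x' <;>
        simp [List.foldl, pvStep, pvAltLoop, hx, ih] <;> ring
  | case2 =>
      intro k
      simp [List.foldl, pvStep, pvAltLoop]
  | case3 c rest h1 h2 ih =>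
      intro k
      have hc : ¬ c = '\\' := by
        intro h
        cases rest with
        | nil => exact h2 h rfl
        | cons a t => exact h1 a t h rfl
      simp [List.foldl, pvStep, pvAltLoop, hc, ih]
      ring
  | case4 =>
      intro k; simp [List.foldl, pvAltLoop]

-- ===== VERDICT (by name: the statement is the Claim_ definition above) =====
theorem char_in_memory_spec : Claim_equal_char_in_memory := by
  intro raw _
  unfold Spec_char_in_memory char_in_memory char_in_memory_alt
  have h := pvLoop_eq raw.toList (-2)
  rw [show (fun (st : Int × Bool) (c : Char) =>
      if !st.2 && c = '\\' then (st.1, true)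
      else if st.2 then ((if c = 'x' then st.1 - 2 else st.1) + 1, false)
      else (st.1 + 1, false)) = pvStep from rfl]
  omega
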